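-- pv_equiv track=rewrite | github.com/jackgrauer/CHONKER_SNYFTER | python/extraction_pipeline.py | identify_column_groups
-- ===== SOURCE A (Python) =====
-- from typing import Dict, List, Any, Optional
--
-- def identify_column_groups(flat_mapping: Dict) -> Dict[str, List[int]]:
--     """Identify meaningful column groups based on header analysis"""
--     groups = {}
--
--     # Group by common parent headers
--     for col_idx, header_chain in flat_mapping.items():
--         if len(header_chain) > 1:  # Has parent header
--             parent_text = header_chain[0]['text'].strip()
--             if parent_text:  # Only process non-empty parent text
--                 if parent_text not in groups:
--                     groups[parent_text] = []
--                 if col_idx not in groups[parent_text]: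
--                     groups[parent_text].append(col_idx)
--
--     # Group by semantic similarity (e.g., all "Conc" columns)
--     semantic_groups = {}
--     for col_idx, header_chain in flat_mapping.items():
--         leaf_header = header_chain[-1]['text'].strip().lower() if header_chain else ''
--
--         # Common analytical chemistry column types
--         if 'conc' in leaf_header or 'concentration' in leaf_header:
--             semantic_groups.setdefault('concentrations', []).append(col_idx)
--         elif leaf_header in ['q', 'qual', 'qualifier']:
--             semantic_groups.setdefault('qualifiers', []).append(col_idx)
--         elif leaf_header in ['rl', 'reporting', 'limit']:
--             semantic_groups.setdefault('reporting_limits', []).append(col_idx)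
--         elif leaf_header in ['mdl', 'detection', 'limit']:
--             semantic_groups.setdefault('detection_limits', []).append(col_idx)
--
--     groups.update(semantic_groups)
--     return groups
-- ===== SOURCE B (Python) =====
-- def _leaf(chain):
--     return chain[-1]['text'].strip().lower() if chain else ''
--
--
-- def _category(chain):
--     leaf = _leaf(chain)
--     if 'conc' in leaf or 'concentration' in leaf:
--         return 'concentrations'
--     if leaf in ('q', 'qual', 'qualifier'):
--         return 'qualifiers'
--     if leaf in ('rl', 'reporting', 'limit'):
--         return 'reporting_limits'
--     if leaf in ('mdl', 'detection', 'limit'):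
--         return 'detection_limits'
--     return None
--
--
-- def _parent(chain):
--     if len(chain) > 1:
--         p = chain[0]['text'].strip()
--         if p:
--             return p
--     return None
--
--
-- def identify_column_groups(flat_mapping):
--     """Key-major: compute the ordered list of group keys first, then build each
--     group's column list by a per-key selection over the items (no dicts of
--     accumulators are maintained; a semantic key's columns win over a parent
--     header of the same name, reproducing update())."""
--     items = list(flat_mapping.items())
--     parent_keys = list(dict.fromkeys(
--         p for _, ch in items if (p := _parent(ch)) is not None))
--     sem_keys = list(dict.fromkeys(
--         c for _, ch in items if (c := _category(ch)) is not None))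
--     ordered = parent_keys + [k for k in sem_keys if k not in parent_keys]
--     return {
--         key: ([c for c, ch in items if _category(ch) == key] if key in sem_keys
--               else [c for c, ch in items if _parent(ch) == key])
--         for key in ordered
--     }
-- ===== Notes on version B (the rewrite author's own statement) =====
-- stated objective: alternative
-- what changed: B is key-major instead of accumulator-based: it never maintains dicts of growing lists while scanning the items; it first computes the ordered list of group keys (deduped parent labels, then new semantic labels), then builds each group's column list by a per-key selection over the items, with a semantic key's columns taking precedence to reproduce A's update().
import Mathlib
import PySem

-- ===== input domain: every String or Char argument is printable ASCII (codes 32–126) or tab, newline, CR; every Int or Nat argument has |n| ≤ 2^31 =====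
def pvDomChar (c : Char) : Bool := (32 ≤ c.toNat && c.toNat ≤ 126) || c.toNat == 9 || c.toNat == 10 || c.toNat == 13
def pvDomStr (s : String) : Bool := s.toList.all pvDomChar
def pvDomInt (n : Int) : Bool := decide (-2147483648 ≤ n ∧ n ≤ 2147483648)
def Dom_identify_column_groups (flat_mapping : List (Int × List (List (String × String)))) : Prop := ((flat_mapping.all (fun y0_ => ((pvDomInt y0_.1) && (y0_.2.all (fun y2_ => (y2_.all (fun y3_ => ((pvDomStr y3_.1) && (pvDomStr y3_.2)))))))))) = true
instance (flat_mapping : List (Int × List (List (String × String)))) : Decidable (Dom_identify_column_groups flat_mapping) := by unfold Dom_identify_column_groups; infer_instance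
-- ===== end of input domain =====

-- B replaces A's accumulator-dict passes by a key-major construction: it lists the ordered
-- group keys first and then selects each key's columns by a per-key scan; same result.

-- chain[i]['text'] : dict lookup in the inner dict (none = KeyError, excluded by Pre_)
def pvTextOf? (d : List (String × String)) : Option String :=
  (PySem.Dict.ofList d).get? "text"

-- "header_chain[-1]['text'].strip().lower() if header_chain else ''" (a line both Pythons share)
def pvLeafText (chain : List (List (String × String))) : String :=
  match chain.getLast?.bind pvTextOf? with
  | some s => PySem.Str.lower (PySem.Str.strip s)
  | none => ""   -- empty chain gives ''; a missing 'text' key (KeyError) is excluded by Pre_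

-- ===== PORT A =====
-- one iteration of A's first loop ("Group by common parent headers")
def pvStepParentA (g : PySem.Dict String (List Int)) (p : Int × List (List (String × String))) : PySem.Dict String (List Int) :=
  if p.2.length > 1 then
    match p.2.head?.bind pvTextOf? with
    | some t0 =>
      let parent := PySem.Str.strip t0
      if parent ≠ "" then
        let g1 := if g.contains parent then g else g.insert parent []
        if p.1 ∈ g1.getD parent [] then g1 else g1.modify parent [] (· ++ [p.1])
      else g
    | none => g   -- KeyError on chain[0]['text']: excluded by Pre_
  else g

-- one iteration of A's second loop ("Group by semantic similarity"); setdefault(k, []).append(c) = modify k [] (· ++ [c])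
def pvStepSemA (sg : PySem.Dict String (List Int)) (p : Int × List (List (String × String))) : PySem.Dict String (List Int) :=
  let leaf := pvLeafText p.2
  if PySem.Str.isIn "conc" leaf || PySem.Str.isIn "concentration" leaf then
    sg.modify "concentrations" [] (· ++ [p.1])
  else if leaf ∈ (["q", "qual", "qualifier"] : List String) then
    sg.modify "qualifiers" [] (· ++ [p.1])
  else if leaf ∈ (["rl", "reporting", "limit"] : List String) then
    sg.modify "reporting_limits" [] (· ++ [p.1])
  else if leaf ∈ (["mdl", "detection", "limit"] : List String) then
    sg.modify "detection_limits" [] (· ++ [p.1])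
  else sg

def identify_column_groups (flat_mapping : List (Int × List (List (String × String)))) : List (String × List Int) :=
  let items := (PySem.Dict.ofList flat_mapping).items   -- flat_mapping.items() of the Python dict
  let groups := items.foldl pvStepParentA PySem.Dict.empty
  let semantic_groups := items.foldl pvStepSemA PySem.Dict.empty
  (groups.update semantic_groups.items).items

-- ===== PORT B =====
-- Source B's _category(chain): the semantic label of the leaf header, if any
def pvCategory? (chain : List (List (String × String))) : Option String :=
  let leaf := pvLeafText chain
  if PySem.Str.isIn "conc" leaf || PySem.Str.isIn "concentration" leaf then some "concentrations"
  else if leaf ∈ (["q", "qual", "qualifier"] : List String) then some "qualifiers"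
  else if leaf ∈ (["rl", "reporting", "limit"] : List String) then some "reporting_limits"
  else if leaf ∈ (["mdl", "detection", "limit"] : List String) then some "detection_limits"
  else none

-- Source B's _parent(chain): the stripped non-empty parent-header text, if any
def pvParent? (chain : List (List (String × String))) : Option String :=
  if chain.length > 1 then
    match chain.head?.bind pvTextOf? with
    | some t0 =>
      let p := PySem.Str.strip t0
      if p ≠ "" then some p else none
    | none => none   -- KeyError: excluded by Pre_
  else none

def identify_column_groups_alt (flat_mapping : List (Int × List (List (String × String)))) : List (String × List Int) :=
  let items := (PySem.Dict.ofList flat_mapping).items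
  let parent_keys := PySem.List.dedup (items.filterMap (fun p => pvParent? p.2))   -- dict.fromkeys dedup
  let sem_keys := PySem.List.dedup (items.filterMap (fun p => pvCategory? p.2))
  let ordered := parent_keys ++ sem_keys.filter (fun k => !(parent_keys.contains k))
  -- the dict comprehension, key by key
  (ordered.foldl (fun d key =>
      d.insert key
        (if sem_keys.contains key then
          (items.filter (fun p => pvCategory? p.2 == some key)).map (·.1)
        else
          (items.filter (fun p => pvParent? p.2 == some key)).map (·.1)))
    PySem.Dict.empty).items

-- ===== PRECONDITION & SPEC =====
def pvChainHasText (d : List (String × String)) : Bool := (PySem.Dict.ofList d).contains "text"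

-- Pre_ excludes exactly the inputs where the Python raises KeyError: some accessed header-cell
-- dict (the last cell of a chain, or the first cell of a chain of length > 1) has no 'text' key.
def Pre_identify_column_groups (flat_mapping : List (Int × List (List (String × String)))) : Prop :=
  ∀ p ∈ (PySem.Dict.ofList flat_mapping).items,
    p.2.getLast?.all pvChainHasText = true ∧ (p.2.length > 1 → p.2.head?.all pvChainHasText = true)
instance (flat_mapping : List (Int × List (List (String × String)))) : Decidable (Pre_identify_column_groups flat_mapping) := by unfold Pre_identify_column_groups; infer_instance

def pvWitness_identify_column_groups : (List (Int × List (List (String × String)))) :=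
  [(0, [[("text", "Metals")], [("text", "Conc")]]),
   (1, [[("text", "Metals")], [("text", "Q")]]),
   (2, [[("text", " RL ")]])]

def Spec_identify_column_groups (flat_mapping : List (Int × List (List (String × String)))) (out : List (String × List Int)) : Prop := out = identify_column_groups_alt flat_mapping
instance (flat_mapping : List (Int × List (List (String × String)))) (out : List (String × List Int)) : Decidable (Spec_identify_column_groups flat_mapping out) := by unfold Spec_identify_column_groups; infer_instance

-- ===== CLAIM (what is proved, stated in full; the proofs are below) =====
def Claim_equal_identify_column_groups : Prop := ∀ (flat_mapping : List (Int × List (List (String × String)))), Dom_identify_column_groups flat_mapping → Pre_identify_column_groups flat_mapping → Spec_identify_column_groups flat_mapping (identify_column_groups flat_mapping)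

-- ===== LEMMAS AND PROOFS =====

-- the plain "setdefault-append" step keyed by an optional label: proof-layer normal form of both of A's loop bodies
def pvStepMod (lab : List (List (String × String)) → Option String)
    (d : PySem.Dict String (List Int)) (p : Int × List (List (String × String))) : PySem.Dict String (List Int) :=
  match lab p.2 with
  | some k => d.modify k [] (· ++ [p.1])
  | none => d

-- A's semantic step IS pvStepMod pvCategory?
theorem pvStepSemA_eq (sg : PySem.Dict String (List Int)) (p : Int × List (List (String × String))) :
    pvStepSemA sg p = pvStepMod pvCategory? sg p := by
  simp only [pvStepSemA, pvStepMod, pvCategory?]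
  split_ifs <;> rfl

-- A's guarded parent step equals pvStepMod pvParent?, provided p.1 sits in no bucket of g
theorem pvStepParentA_eq (g : PySem.Dict String (List Int)) (p : Int × List (List (String × String)))
    (h : ∀ t lst, g.get? t = some lst → p.1 ∉ lst) :
    pvStepParentA g p = pvStepMod pvParent? g p := by
  have hmodify : ∀ (d : PySem.Dict String (List Int)) (k : String),
      d.modify k [] (· ++ [p.1]) = d.insert k (d.getD k [] ++ [p.1]) := fun _ _ => rfl
  simp only [pvStepParentA, pvStepMod, pvParent?]
  by_cases h1 : p.2.length > 1
  · simp only [if_pos h1]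
    cases htext : p.2.head?.bind pvTextOf? with
    | none => rfl
    | some t0 =>
      simp only
      by_cases h2 : PySem.Str.strip t0 ≠ ""
      · simp only [if_pos h2]
        by_cases hc : g.contains (PySem.Str.strip t0) = true
        · rw [if_pos hc]
          obtain ⟨lst, hlst⟩ : ∃ lst, g.get? (PySem.Str.strip t0) = some lst := by
            apply Option.isSome_iff_exists.mp
            rw [← PySem.Dict.contains_eq_isSome_get?]; exact hc
          rw [if_neg (by rw [PySem.Dict.getD_eq_get?_getD, hlst, Option.getD_some]
                         exact h _ _ hlst)]
        · rw [if_neg hc, PySem.Dict.getD_insert_self,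
              if_neg (List.not_mem_nil (a := p.1)), hmodify, hmodify,
              PySem.Dict.getD_insert_self, PySem.Dict.insert_insert_self,
              PySem.Dict.getD_of_not_contains g [] (Bool.not_eq_true _ |>.mp hc)]
      · simp only [if_neg h2]
  · simp only [if_neg h1]

-- folding A's guarded parent step = folding pvStepMod pvParent?, given fresh, distinct column indices
theorem pvParentFold_eq : ∀ (l : List (Int × List (List (String × String)))) (g : PySem.Dict String (List Int)),
    (∀ t lst x, g.get? t = some lst → x ∈ lst → x ∉ l.map Prod.fst) →
    (l.map Prod.fst).Nodup →
    l.foldl pvStepParentA g = l.foldl (pvStepMod pvParent?) g := by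
  intro l
  induction l with
  | nil => intro g _ _; rfl
  | cons p rest ih =>
    intro g h hnd
    simp only [List.map_cons, List.nodup_cons] at hnd
    have hstep : pvStepParentA g p = pvStepMod pvParent? g p :=
      pvStepParentA_eq g p (fun t lst hget hmem =>
        (h t lst p.1 hget hmem) (by simp))
    simp only [List.foldl_cons, hstep]
    apply ih
    · intro t lst x hget hmem
      have key : ∀ par, (g.insert par (g.getD par [] ++ [p.1])).get? t = some lst →
          x ∈ lst → x ∉ rest.map Prod.fst := by
        intro par hget' hmem'
        by_cases ht : t = par
        · subst ht
          rw [PySem.Dict.get?_insert_self] at hget'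
          cases hget'
          rcases List.mem_append.mp hmem' with hx | hx
          · rcases hg : g.get? t with _ | lst0
            · rw [PySem.Dict.getD_eq_get?_getD, hg] at hx; simp at hx
            · rw [PySem.Dict.getD_eq_get?_getD, hg, Option.getD_some] at hx
              exact fun hc => h t lst0 x hg hx (by simp [hc])
          · simp at hx; subst hx; exact hnd.1
        · rw [PySem.Dict.get?_insert_of_ne _ _ ht] at hget'
          exact fun hc => h t _ x hget' hmem (by simp [hc])
      unfold pvStepMod at hget
      revert hget
      cases hl : pvParent? p.2 with
      | none => exact fun hget => fun hc => h t lst x hget hmem (by simp [hc])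
      | some k =>
        dsimp only
        have hmodify : (g.modify k [] (· ++ [p.1])) = g.insert k (g.getD k [] ++ [p.1]) := rfl
        rw [hmodify]
        exact fun hget => key _ hget hmem
    · exact hnd.2

-- a fold whose step fires on an optional label is a fold over the filterMap of labelled pairs
theorem pvFold_filterMap (lab : List (List (String × String)) → Option String) :
    ∀ (l : List (Int × List (List (String × String)))) (d : PySem.Dict String (List Int)),
    l.foldl (pvStepMod lab) d
      = (l.filterMap (fun p => (lab p.2).map (fun k => (k, p.1)))).foldl
          (fun d q => d.modify q.1 [] (· ++ [q.2])) d := by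
  intro l
  induction l with
  | nil => intro d; rfl
  | cons p rest ih =>
    intro d
    simp only [List.foldl_cons, List.filterMap_cons]
    cases hl : lab p.2 with
    | none => simpa [pvStepMod, hl] using ih d
    | some k => simpa [pvStepMod, hl] using ih _

-- the labelled pairs project back to the labels
theorem pvPairs_map_fst (lab : List (List (String × String)) → Option String)
    (l : List (Int × List (List (String × String)))) :
    (l.filterMap (fun p => (lab p.2).map (fun k => (k, p.1)))).map Prod.fst
      = l.filterMap (fun p => lab p.2) := by
  rw [List.map_filterMap]
  simp [Option.map_map, Function.comp_def]

-- selecting a label's columns from the labelled pairs = filtering the items by that label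
theorem pvPairs_filter (lab : List (List (String × String)) → Option String)
    (l : List (Int × List (List (String × String)))) (k : String) :
    (((l.filterMap (fun p => (lab p.2).map (fun j => (j, p.1)))).filter (fun q => q.1 == k)).map (·.2))
      = (l.filter (fun p => lab p.2 == some k)).map (·.1) := by
  induction l with
  | nil => rfl
  | cons p rest ih =>
    simp only [List.filterMap_cons]
    cases hl : lab p.2 with
    | none => simpa [hl] using ih
    | some j =>
      by_cases hj : j = k
      · subst hj; simpa [hl] using congrArg (List.cons p.1) ih
      · have h1 : (j == k) = false := by simpa using hj
        have h2 : (lab p.2 == some k) = false := by simp [hl, hj]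
        simpa [List.filter_cons, h1, h2] using ih

-- lookups after update with distinct-key pairs: the pairs win where they bind
theorem pvGet?_update (pairs : List (String × List Int)) :
    ∀ (d : PySem.Dict String (List Int)) (k : String), (pairs.map Prod.fst).Nodup →
    (d.update pairs).get? k
      = ((pairs.find? (fun q => q.1 == k)).map (·.2)).or (d.get? k) := by
  induction pairs with
  | nil => intro d k _; rfl
  | cons q rest ih =>
    intro d k hnd
    simp only [List.map_cons, List.nodup_cons] at hnd
    have hupd : d.update (q :: rest) = (d.insert q.1 q.2).update rest := rfl
    rw [hupd, ih _ k hnd.2]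
    by_cases hk : q.1 = k
    · subst hk
      have hnone : rest.find? (fun r => r.1 == q.1) = none := by
        rw [List.find?_eq_none]
        intro r hr hc
        exact hnd.1 (eq_of_beq hc ▸ List.mem_map_of_mem hr)
      simp [hnone, PySem.Dict.get?_insert_self]
    · have : (d.insert q.1 q.2).get? k = d.get? k := PySem.Dict.get?_insert_of_ne _ _ (Ne.symm hk)
      simp [show (q.1 == k) = false by simpa using hk, this]

-- a Dict's get? IS the first-match scan of its items
theorem pvGet?_eq_find? (d : PySem.Dict String (List Int)) (k : String) :
    d.get? k = ((d.items.find? (fun q => q.1 == k)).map (·.2)) := rfl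

-- the whole equivalence, on any items list with distinct column indices
theorem pvMain (l : List (Int × List (List (String × String))))
    (hnd : (l.map Prod.fst).Nodup) :
    ((l.foldl pvStepParentA PySem.Dict.empty).update (l.foldl pvStepSemA PySem.Dict.empty).items).items
    = ((PySem.List.dedup (l.filterMap (fun p => pvParent? p.2))
        ++ (PySem.List.dedup (l.filterMap (fun p => pvCategory? p.2))).filter
            (fun k => !((PySem.List.dedup (l.filterMap (fun p => pvParent? p.2))).contains k))).foldl
        (fun d key => d.insert key
          (if (PySem.List.dedup (l.filterMap (fun p => pvCategory? p.2))).contains key then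
            (l.filter (fun p => pvCategory? p.2 == some key)).map (·.1)
          else
            (l.filter (fun p => pvParent? p.2 == some key)).map (·.1)))
        PySem.Dict.empty).items := by
  have hA1 : l.foldl pvStepParentA PySem.Dict.empty
      = (l.filterMap (fun p => (pvParent? p.2).map (fun k => (k, p.1)))).foldl
          (fun d q => d.modify q.1 [] (· ++ [q.2])) PySem.Dict.empty := by
    rw [pvParentFold_eq l _ (fun t lst x hget => by
          rw [PySem.Dict.get?_empty] at hget; cases hget) hnd,
        pvFold_filterMap]
  have hA2 : l.foldl pvStepSemA PySem.Dict.empty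
      = (l.filterMap (fun p => (pvCategory? p.2).map (fun k => (k, p.1)))).foldl
          (fun d q => d.modify q.1 [] (· ++ [q.2])) PySem.Dict.empty := by
    have he : pvStepSemA = pvStepMod pvCategory? := funext fun a => funext fun b => pvStepSemA_eq a b
    rw [he, pvFold_filterMap]
  rw [hA1, hA2]
  -- names for the two normalised dicts
  generalize hgeq : (l.filterMap (fun p => (pvParent? p.2).map (fun k => (k, p.1)))).foldl
          (fun d q => d.modify q.1 [] (· ++ [q.2])) PySem.Dict.empty = g
  generalize hsgeq : (l.filterMap (fun p => (pvCategory? p.2).map (fun k => (k, p.1)))).foldl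
          (fun d q => d.modify q.1 [] (· ++ [q.2])) PySem.Dict.empty = sg
  -- keys of the two dicts are the deduped label lists
  have hgkeys : g.keys = PySem.List.dedup (l.filterMap (fun p => pvParent? p.2)) := by
    rw [← hgeq,
        PySem.Dict.keys_foldl_modify_key _ Prod.fst [] (fun _ q => (· ++ [q.2])) PySem.Dict.empty,
        PySem.Dict.keys_empty, PySem.Set.update_nil_left, pvPairs_map_fst,
        PySem.List.dedup_eq_ofList]
  have hsgkeys : sg.keys = PySem.List.dedup (l.filterMap (fun p => pvCategory? p.2)) := by
    rw [← hsgeq,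
        PySem.Dict.keys_foldl_modify_key _ Prod.fst [] (fun _ q => (· ++ [q.2])) PySem.Dict.empty,
        PySem.Dict.keys_empty, PySem.Set.update_nil_left, pvPairs_map_fst,
        PySem.List.dedup_eq_ofList]
  have hgnodup : g.keys.Nodup := by
    rw [hgkeys, PySem.List.dedup_eq_ofList]; exact PySem.Set.nodup_ofList _
  have hsgnodup : sg.keys.Nodup := by
    rw [hsgkeys, PySem.List.dedup_eq_ofList]; exact PySem.Set.nodup_ofList _
  rw [← hgkeys, ← hsgkeys]
  -- lookups in the two dicts select the matching items
  have hsgval : ∀ k, sg.getD k [] = (l.filter (fun p => pvCategory? p.2 == some k)).map (·.1) := by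
    intro k
    rw [← hsgeq, PySem.Dict.getD_foldl_modify_append, PySem.Dict.getD_empty, pvPairs_filter]
    rfl
  have hgval : ∀ k, g.getD k [] = (l.filter (fun p => pvParent? p.2 == some k)).map (·.1) := by
    intro k
    rw [← hgeq, PySem.Dict.getD_foldl_modify_append, PySem.Dict.getD_empty, pvPairs_filter]
    rfl
  -- keys of the updated dict
  have hsgitems_fst : sg.items.map Prod.fst = sg.keys := rfl
  have hukeys : (g.update sg.items).keys
      = g.keys ++ sg.keys.filter (fun k => !(g.keys.contains k)) := by
    have h0 : (g.update sg.items).keys = PySem.Set.update g.keys (sg.items.map Prod.fst) :=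
      PySem.Dict.keys_foldl_insert_key sg.items Prod.fst (fun _ q => q.2) g
    rw [h0, hsgitems_fst, PySem.Set.update_eq_append_filter,
        PySem.Set.ofList_eq_self_of_nodup _ hsgnodup]
    simp [PySem.Set.contains_eq_listContains]
  -- per-key value of the updated dict
  have hval : ∀ k, (g.update sg.items).getD k []
      = (if sg.keys.contains k then (l.filter (fun p => pvCategory? p.2 == some k)).map (·.1)
        else (l.filter (fun p => pvParent? p.2 == some k)).map (·.1)) := by
    intro k
    have hnsg : (sg.items.map Prod.fst).Nodup := by rw [hsgitems_fst]; exact hsgnodup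
    rw [PySem.Dict.getD_eq_get?_getD, pvGet?_update sg.items g k hnsg, ← pvGet?_eq_find? sg k]
    by_cases hk : k ∈ sg.keys
    · have hcont : sg.keys.contains k = true := by simpa using hk
      obtain ⟨v, hv⟩ : ∃ v, sg.get? k = some v := by
        cases h : sg.get? k with
        | none => exact absurd ((PySem.Dict.get?_eq_none_iff_not_mem_keys sg k).mp h) (by simpa using hk)
        | some v => exact ⟨v, rfl⟩
      have hvval : v = sg.getD k [] := by rw [PySem.Dict.getD_eq_get?_getD, hv]; rfl
      rw [hv, if_pos hcont, ← hsgval k, ← hvval]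
      rfl
    · have hcont : sg.keys.contains k = false := by simpa using hk
      have hnone : sg.get? k = none := (PySem.Dict.get?_eq_none_iff_not_mem_keys sg k).mpr hk
      rw [hnone, if_neg (by simpa using hk), ← hgval k, PySem.Dict.getD_eq_get?_getD]
      rfl
  -- both sides as maps over the same key list
  have hunodup : (g.update sg.items).keys.Nodup := PySem.Dict.nodup_keys_update g sg.items hgnodup
  have hordnodup : (g.keys ++ sg.keys.filter (fun k => !(g.keys.contains k))).Nodup := by
    rw [← hukeys]; exact hunodup
  rw [PySem.Dict.items_eq_map_keys (g.update sg.items) hunodup [], hukeys,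
      PySem.Dict.items_foldl_insert_fresh _ (fun a => a) _ PySem.Dict.empty
        (fun a _ => PySem.Dict.contains_empty a) (by simpa using hordnodup)]
  have hfun : (fun k => (k, (g.update sg.items).getD k []))
      = (fun key => (key, if sg.keys.contains key then (l.filter (fun p => pvCategory? p.2 == some key)).map (·.1)
          else (l.filter (fun p => pvParent? p.2 == some key)).map (·.1))) :=
    funext fun k => by rw [hval k]
  rw [hfun]
  rfl

-- ===== VERDICT (by name: the statement is the Claim_ definition above) =====
theorem identify_column_groups_spec : Claim_equal_identify_column_groups := by
  intro fm _ _
  show identify_column_groups fm = identify_column_groups_alt fm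
  exact pvMain (PySem.Dict.ofList fm).items
    (PySem.Dict.nodup_keys_ofList (ps := fm))
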